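-- pv_equiv track=rewrite | github.com/sowmiyan-s/GUARD-RAG | guardrag/utils/safety.py | check_output_safety
-- ===== SOURCE A (Python) =====
-- from typing import Optional, Dict, List
--
-- SENSITIVITY_PROFILES = {
--     "Public": {
--         "description": "No data classification restrictions. Basic jailbreak protection only.",
--         "input_patterns": [],
--         "output_patterns": [],
--         "badge": "public",
--     },
--     "Internal": {
--         "description": "Suitable for internal business data. Blocks credential and API key exposure.",
--         "input_patterns": [
--             "api key", "api_key", "password", "secret key", "access token",
--             "private key", "credential"
--         ],
--         "output_patterns": [
--             "api_key", "api key", "password", "access_token", "credential",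
--             "private_key", "bearer token"
--         ],
--         "badge": "internal",
--     },
--     "Confidential": {
--         "description": "For confidential data. Adds PII protection.",
--         "input_patterns": [
--             "api key", "api_key", "password", "secret key", "access token",
--             "private key", "credential", "social security", "ssn",
--             "date of birth", "home address", "phone number", "email address",
--             "credit card", "bank account",
--         ],
--         "output_patterns": [
--             "api_key", "api key", "password", "access_token", "credential",
--             "private_key", "bearer token", "ssn", "social security",
--             "date of birth", "credit card", "bank account",
--         ],
--         "badge": "confidential",
--     },
--     "Restricted": {
--         "description": "Maximum protection. For highly sensitive or regulated data (HIPAA, GDPR, financial).",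
--         "input_patterns": [
--             "api key", "api_key", "password", "secret key", "access token",
--             "private key", "credential", "social security", "ssn",
--             "date of birth", "home address", "phone number", "email address",
--             "credit card", "bank account", "medical record", "diagnosis",
--             "prescription", "patient", "salary", "tax return",
--             "financial statement", "trading", "investment",
--         ],
--         "output_patterns": [
--             "api_key", "api key", "password", "access_token", "credential",
--             "private_key", "bearer token", "ssn", "social security",
--             "date of birth", "credit card", "bank account", "medical record",
--             "diagnosis", "prescription", "patient id", "salary", "tax", "financial",
--         ],
--         "badge": "restricted",
--     },
-- }
--
-- def check_output_safety(
--     response: str,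
--     sensitivity: str,
--     enabled: bool = True
-- ) -> Optional[str]:
--     """
--     Check LLM output against sensitivity-level patterns.
--
--     Args:
--         response: The LLM's response text
--         sensitivity: Sensitivity level (Public, Internal, Confidential, Restricted)
--         enabled: Whether to enforce guardrails
--
--     Returns:
--         Redaction message if blocked, None otherwise
--     """
--     if not enabled:
--         return None
--
--     lower = response.lower()
--     profile = SENSITIVITY_PROFILES.get(sensitivity, SENSITIVITY_PROFILES["Internal"])
--
--     for pat in profile["output_patterns"]:
--         if pat in lower:
--             return f"[REDACTED — Output blocked by {sensitivity} data sensitivity policy.]"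
--
--     return None
-- ===== SOURCE B (Python) =====
-- SENSITIVITY_PROFILES = {
--     "Public": {
--         "description": "No data classification restrictions. Basic jailbreak protection only.",
--         "input_patterns": [],
--         "output_patterns": [],
--         "badge": "public",
--     },
--     "Internal": {
--         "description": "Suitable for internal business data. Blocks credential and API key exposure.",
--         "input_patterns": [
--             "api key", "api_key", "password", "secret key", "access token",
--             "private key", "credential"
--         ],
--         "output_patterns": [
--             "api_key", "api key", "password", "access_token", "credential",
--             "private_key", "bearer token"
--         ],
--         "badge": "internal",
--     },
--     "Confidential": {
--         "description": "For confidential data. Adds PII protection.",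
--         "input_patterns": [
--             "api key", "api_key", "password", "secret key", "access token",
--             "private key", "credential", "social security", "ssn",
--             "date of birth", "home address", "phone number", "email address",
--             "credit card", "bank account",
--         ],
--         "output_patterns": [
--             "api_key", "api key", "password", "access_token", "credential",
--             "private_key", "bearer token", "ssn", "social security",
--             "date of birth", "credit card", "bank account",
--         ],
--         "badge": "confidential",
--     },
--     "Restricted": {
--         "description": "Maximum protection. For highly sensitive or regulated data (HIPAA, GDPR, financial).",
--         "input_patterns": [
--             "api key", "api_key", "password", "secret key", "access token",
--             "private key", "credential", "social security", "ssn",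
--             "date of birth", "home address", "phone number", "email address",
--             "credit card", "bank account", "medical record", "diagnosis",
--             "prescription", "patient", "salary", "tax return",
--             "financial statement", "trading", "investment",
--         ],
--         "output_patterns": [
--             "api_key", "api key", "password", "access_token", "credential",
--             "private_key", "bearer token", "ssn", "social security",
--             "date of birth", "credit card", "bank account", "medical record",
--             "diagnosis", "prescription", "patient id", "salary", "tax", "financial",
--         ],
--         "badge": "restricted",
--     },
-- }
--
--
-- def check_output_safety(response, sensitivity, enabled=True):
--     """Single left-to-right scan over response positions instead of one
--     substring search per pattern."""
--     if not enabled: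
--         return None
--     lower = response.lower()
--     patterns = SENSITIVITY_PROFILES.get(sensitivity, SENSITIVITY_PROFILES["Internal"])["output_patterns"]
--     for i in range(len(lower)):
--         if any(lower.startswith(p, i) for p in patterns):
--             return f"[REDACTED — Output blocked by {sensitivity} data sensitivity policy.]"
--     return None
-- ===== Notes on version B (the rewrite author's own statement) =====
-- stated objective: alternative
-- what changed: Replaced A's per-pattern loop of independent full substring searches ('pat in lower') by a single left-to-right scan over the positions of the lowered response, testing at each position whether any pattern starts there (startswith with offset), returning on the first hit.
import Mathlib
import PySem

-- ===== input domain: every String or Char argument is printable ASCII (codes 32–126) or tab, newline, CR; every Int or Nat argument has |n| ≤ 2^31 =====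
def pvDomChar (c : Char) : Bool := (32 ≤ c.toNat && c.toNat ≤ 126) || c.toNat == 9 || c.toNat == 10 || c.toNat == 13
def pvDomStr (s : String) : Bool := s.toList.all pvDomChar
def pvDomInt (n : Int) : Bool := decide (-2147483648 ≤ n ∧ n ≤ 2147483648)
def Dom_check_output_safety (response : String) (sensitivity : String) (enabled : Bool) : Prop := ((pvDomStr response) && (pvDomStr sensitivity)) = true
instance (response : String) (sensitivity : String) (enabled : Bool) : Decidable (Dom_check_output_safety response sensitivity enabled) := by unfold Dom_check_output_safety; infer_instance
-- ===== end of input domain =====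

-- B replaces A's per-pattern substring searches by one left-to-right scan over the
-- response's positions, checking at each position whether any pattern starts there
-- (objective: alternative, same result).

-- ===== PORT A =====
-- module constant: SENSITIVITY_PROFILES.get(sensitivity, SENSITIVITY_PROFILES["Internal"])["output_patterns"]
-- (dict of fixed string-literal keys, ported by hand as the corresponding key chain; exact)
def pvOutputPatterns (sensitivity : String) : List String :=
  if sensitivity = "Public" then []
  else if sensitivity = "Internal" then
    ["api_key", "api key", "password", "access_token", "credential",
     "private_key", "bearer token"]
  else if sensitivity = "Confidential" then
    ["api_key", "api key", "password", "access_token", "credential",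
     "private_key", "bearer token", "ssn", "social security",
     "date of birth", "credit card", "bank account"]
  else if sensitivity = "Restricted" then
    ["api_key", "api key", "password", "access_token", "credential",
     "private_key", "bearer token", "ssn", "social security",
     "date of birth", "credit card", "bank account", "medical record",
     "diagnosis", "prescription", "patient id", "salary", "tax", "financial"]
  else  -- .get default: SENSITIVITY_PROFILES["Internal"]
    ["api_key", "api key", "password", "access_token", "credential",
     "private_key", "bearer token"]

-- f"[REDACTED — Output blocked by {sensitivity} data sensitivity policy.]"
def pvRedactMsg (sensitivity : String) : String :=
  "[REDACTED — Output blocked by " ++ sensitivity ++ " data sensitivity policy.]"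

-- A's for-loop over the patterns with early return
def pvLoopA (lower : String) (msg : String) : List String → Option String
  | [] => none
  | p :: rest => if PySem.Str.isIn p lower then some msg else pvLoopA lower msg rest

def check_output_safety (response : String) (sensitivity : String) (enabled : Bool) : Option String :=
  if !enabled then none
  else
    let lower := PySem.Str.lower response
    pvLoopA lower (pvRedactMsg sensitivity) (pvOutputPatterns sensitivity)

-- ===== PORT B =====
-- B's scan: for i in range(len(lower)): if any(lower.startswith(p, i) …): hit.
-- iterating over the positions = structural recursion over the (nonempty) suffixes
def pvScanHit (pats : List (List Char)) : List Char → Bool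
  | [] => false
  | c :: t =>
      if pats.any (fun p => PySem.Chars.startswith (c :: t) p) then true
      else pvScanHit pats t

def check_output_safety_alt (response : String) (sensitivity : String) (enabled : Bool) : Option String :=
  if !enabled then none
  else
    let lower := PySem.Chars.lower response.toList
    let pats := (pvOutputPatterns sensitivity).map String.toList
    if pvScanHit pats lower then some (pvRedactMsg sensitivity) else none

-- ===== PRECONDITION & SPEC =====
def Spec_check_output_safety (response : String) (sensitivity : String) (enabled : Bool) (out : Option String) : Prop := out = check_output_safety_alt response sensitivity enabled
instance (response : String) (sensitivity : String) (enabled : Bool) (out : Option String) : Decidable (Spec_check_output_safety response sensitivity enabled out) := by unfold Spec_check_output_safety; infer_instance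

-- ===== CLAIM (what is proved, stated in full; the proofs are below) =====
def Claim_equal_check_output_safety : Prop := ∀ (response : String) (sensitivity : String) (enabled : Bool), Dom_check_output_safety response sensitivity enabled → Spec_check_output_safety response sensitivity enabled (check_output_safety response sensitivity enabled)

-- ===== LEMMAS AND PROOFS =====

-- A's early-return loop over a constant message is an 'any'
theorem pvLoopA_eq (lower msg : String) (pats : List String) :
    pvLoopA lower msg pats =
      if pats.any (fun p => PySem.Str.isIn p lower) then some msg else none := by
  induction pats with
  | nil => rfl
  | cons p rest ih =>
      simp only [pvLoopA, List.any_cons, ih, Bool.or_eq_true]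
      split_ifs <;> tauto

-- B's position scan finds a hit iff some (nonempty) pattern occurs as a substring
theorem pvScanHit_eq {pats : List (List Char)} (hne : ∀ p ∈ pats, p ≠ []) (s : List Char) :
    pvScanHit pats s = pats.any (fun p => PySem.Chars.isIn p s) := by
  induction s with
  | nil =>
      simp only [pvScanHit]
      rcases h : pats.any (fun p => PySem.Chars.isIn p ([] : List Char)) with _ | _
      · rfl
      · exfalso
        rcases List.any_eq_true.mp h with ⟨p, hp, hin⟩
        have : p <:+: ([] : List Char) := (PySem.Chars.isIn_iff_infix p []).mp hin
        exact hne p hp (List.eq_nil_of_infix_nil this)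
  | cons c t ih =>
      simp only [pvScanHit, ih]
      rcases hA : pats.any (fun p => PySem.Chars.startswith (c :: t) p) with _ | _
      · -- no pattern starts at position 0: hit in c::t ↔ hit in t
        simp only [Bool.false_eq_true, if_false]
        refine Bool.eq_iff_iff.mpr ?_
        simp only [List.any_eq_true]
        constructor
        · rintro ⟨p, hp, h1⟩
          have : p <:+: (c :: t) :=
            ((PySem.Chars.isIn_iff_infix p t).mp h1).trans (List.suffix_cons c t).isInfix
          exact ⟨p, hp, (PySem.Chars.isIn_iff_infix p (c :: t)).mpr this⟩
        · rintro ⟨p, hp, h2⟩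
          have hnp : ¬ p <+: (c :: t) := by
            have := List.any_eq_false.mp (by simpa using hA) p hp
            simpa [PySem.Chars.startswith_iff] using this
          rcases List.infix_cons_iff.mp ((PySem.Chars.isIn_iff_infix p (c :: t)).mp h2) with hpre | hinf
          · exact absurd hpre hnp
          · exact ⟨p, hp, (PySem.Chars.isIn_iff_infix p t).mpr hinf⟩
      · -- some pattern starts at position 0, hence occurs in c::t
        simp only [if_true]
        rcases List.any_eq_true.mp hA with ⟨p, hp, hsw⟩
        have : p <:+: (c :: t) := ((PySem.Chars.startswith_iff (c :: t) p).mp hsw).isInfix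
        exact (List.any_eq_true.mpr ⟨p, hp, (PySem.Chars.isIn_iff_infix p (c :: t)).mpr this⟩).symm

theorem pvOutputPatterns_ne_nil (sensitivity : String) :
    ∀ p ∈ (pvOutputPatterns sensitivity).map String.toList, p ≠ [] := by
  unfold pvOutputPatterns
  split_ifs <;> decide

-- ===== VERDICT (by name: the statement is the Claim_ definition above) =====
theorem check_output_safety_spec : Claim_equal_check_output_safety := by
  intro response sensitivity enabled _
  unfold Spec_check_output_safety check_output_safety check_output_safety_alt
  cases enabled with
  | false => rfl
  | true =>
      simp only [Bool.not_true, Bool.false_eq_true, if_false]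
      rw [pvLoopA_eq, pvScanHit_eq (pvOutputPatterns_ne_nil sensitivity)]
      rw [List.any_map]
      have hfun : ((pvOutputPatterns sensitivity).any fun p => PySem.Str.isIn p (PySem.Str.lower response)) =
          (pvOutputPatterns sensitivity).any
            ((fun p => PySem.Chars.isIn p (PySem.Chars.lower response.toList)) ∘ String.toList) :=
        List.any_congr rfl fun p => by simp [pysem]
      rw [hfun]
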